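-- pv_equiv track=rewrite | github.com/Ultraman6/CFLF | utils/generator.py | find_nearest_milestones
-- ===== SOURCE A (Python) =====
-- def find_nearest_milestones(emd, milestones):
--     # Convert the dictionary keys to a list and sort them, just in case they aren't already
--     sorted_emds = sorted(milestones.keys())
--     lower_milestone_emd = None
--     upper_milestone_emd = None
--     for i in range(len(sorted_emds) - 1):
--         if sorted_emds[i] <= emd <= sorted_emds[i + 1]:
--             lower_milestone_emd = sorted_emds[i]
--             upper_milestone_emd = sorted_emds[i + 1]
--             break
--     # If no exact match or range is found, handle edge cases
--     if lower_milestone_emd is None and upper_milestone_emd is None: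
--         if emd < sorted_emds[0]:
--             upper_milestone_emd = sorted_emds[0]  # emd is below the lowest milestone
--         elif emd > sorted_emds[-1]:
--             lower_milestone_emd = sorted_emds[-1]  # emd is above the highest milestone
--
--     return lower_milestone_emd, upper_milestone_emd
-- ===== SOURCE B (Python) =====
-- def find_nearest_milestones(emd, milestones):
--     # B: compute the rank of emd (number of milestone keys strictly below it)
--     # in one pass over the sorted keys, then derive the bracketing pair by
--     # index arithmetic instead of scanning adjacent pairs.
--     sorted_emds = sorted(milestones.keys())
--     n = len(sorted_emds)
--     rank = 0
--     for x in sorted_emds: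
--         if x < emd:
--             rank += 1
--     if rank == n:
--         return sorted_emds[-1], None  # emd above every key (IndexError on empty dict, like A)
--     if rank > 0:
--         return sorted_emds[rank - 1], sorted_emds[rank]
--     if emd == sorted_emds[0]:
--         if n > 1:
--             return sorted_emds[0], sorted_emds[1]
--         return None, None
--     return None, sorted_emds[0]
-- ===== Notes on version B (the rewrite author's own statement) =====
-- stated objective: alternative
-- what changed: Replaces A's break-out scan over adjacent sorted-key pairs plus a post-hoc None-sentinel edge-case patch by a single rank computation (count of keys strictly below emd) followed by pure index arithmetic on the sorted keys.
import Mathlib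
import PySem

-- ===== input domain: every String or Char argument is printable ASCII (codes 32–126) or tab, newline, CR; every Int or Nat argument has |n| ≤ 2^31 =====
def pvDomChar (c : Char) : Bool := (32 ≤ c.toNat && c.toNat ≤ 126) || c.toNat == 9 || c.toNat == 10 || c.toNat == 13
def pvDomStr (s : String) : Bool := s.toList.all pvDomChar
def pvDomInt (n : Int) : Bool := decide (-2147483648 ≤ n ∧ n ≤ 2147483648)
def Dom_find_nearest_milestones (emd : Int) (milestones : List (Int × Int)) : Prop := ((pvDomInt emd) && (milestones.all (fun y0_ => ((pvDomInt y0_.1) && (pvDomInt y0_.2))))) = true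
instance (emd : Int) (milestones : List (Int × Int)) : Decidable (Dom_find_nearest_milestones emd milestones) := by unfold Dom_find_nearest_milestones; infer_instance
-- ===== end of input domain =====

-- B replaces A's adjacent-pair scan by a rank (count of keys below emd) and index
-- arithmetic on the sorted keys; same values everywhere A returns (alternative, not faster).

-- ===== PORT A =====
-- the 'for i in range(len(sorted_emds) - 1): if sorted_emds[i] <= emd <= sorted_emds[i+1]: …; break' loop,
-- as structural recursion over consecutive elements
def pvScanA (emd : Int) : List Int → Option (Int × Int)
  | a :: b :: t => if a ≤ emd ∧ emd ≤ b then some (a, b) else pvScanA emd (b :: t)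
  | _ => none

-- the break-or-edge-case combination after the loop
def pvFinishA (emd : Int) (sorted_emds : List Int) : Option Int × Option Int :=
  match pvScanA emd sorted_emds with
  | some (l, u) => (some l, some u)
  | none =>
    match sorted_emds.head?, sorted_emds.getLast? with
    | some h, some l =>
        if emd < h then (none, some h)
        else if emd > l then (some l, none)
        else (none, none)
    | _, _ => (none, none)  -- sorted_emds = []: Python raises IndexError here (excluded by Pre_)

def find_nearest_milestones (emd : Int) (milestones : List (Int × Int)) : Option Int × Option Int :=
  pvFinishA emd (PySem.List.sorted (PySem.Dict.ofList milestones).keys (fun x => x))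

-- ===== PORT B =====
def pvFinishB (emd : Int) (s : List Int) : Option Int × Option Int :=
  let n : Int := s.length
  let rank : Int := s.foldl (fun acc x => if x < emd then acc + 1 else acc) 0
  if rank = n then
    match s.getLast? with
    | some last => (some last, none)
    | none => (none, none)  -- s = []: Python raises IndexError here (excluded by Pre_)
  else if 0 < rank then
    (PySem.List.pyGet? s (rank - 1), PySem.List.pyGet? s rank)
  else
    match s.head? with
    | some h =>
        if emd = h then
          if 1 < n then (s.head?, PySem.List.pyGet? s 1) else (none, none)
        else (none, s.head?)
    | none => (none, none)  -- unreachable: s = [] already taken by the rank = n branch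

def find_nearest_milestones_alt (emd : Int) (milestones : List (Int × Int)) : Option Int × Option Int :=
  pvFinishB emd (PySem.List.sorted (PySem.Dict.ofList milestones).keys (fun x => x))

-- ===== PRECONDITION & SPEC =====
-- Pre_ excludes exactly the empty dict, on which A raises IndexError (sorted_emds[0]).
def Pre_find_nearest_milestones (emd : Int) (milestones : List (Int × Int)) : Prop := milestones ≠ []
instance (emd : Int) (milestones : List (Int × Int)) : Decidable (Pre_find_nearest_milestones emd milestones) := by unfold Pre_find_nearest_milestones; infer_instance

def pvWitness_find_nearest_milestones : Int × (List (Int × Int)) := (3, [(1, 10), (5, 20)])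

def Spec_find_nearest_milestones (emd : Int) (milestones : List (Int × Int)) (out : Option Int × Option Int) : Prop := out = find_nearest_milestones_alt emd milestones
instance (emd : Int) (milestones : List (Int × Int)) (out : Option Int × Option Int) : Decidable (Spec_find_nearest_milestones emd milestones out) := by unfold Spec_find_nearest_milestones; infer_instance

-- ===== CLAIM (what is proved, stated in full; the proofs are below) =====
def Claim_equal_find_nearest_milestones : Prop := ∀ (emd : Int) (milestones : List (Int × Int)), Dom_find_nearest_milestones emd milestones → Pre_find_nearest_milestones emd milestones → Spec_find_nearest_milestones emd milestones (find_nearest_milestones emd milestones)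

-- ===== LEMMAS AND PROOFS =====

lemma pvScanA_none (emd : Int) : ∀ s : List Int, (∀ x ∈ s, emd < x) → pvScanA emd s = none := by
  intro s
  induction s with
  | nil => intro _; rfl
  | cons a t ih =>
    intro h
    cases t with
    | nil => rfl
    | cons b u =>
      have ha : emd < a := h a (by simp)
      simp only [pvScanA]
      rw [if_neg (by omega)]
      exact ih (fun x hx => h x (List.mem_cons_of_mem _ hx))

lemma rank_eq (emd : Int) (s : List Int) :
    s.foldl (fun acc x => if x < emd then acc + 1 else acc) (0:Int)
      = ((s.countP (fun x => decide (x < emd)) : Nat) : Int) := by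
  simpa using PySem.List.foldl_ite_add_one (fun x => x < emd) s 0

lemma contains_update_mono {ps : List (Int × Int)} : ∀ (d : PySem.Dict Int Int) (k : Int),
    d.contains k = true → (d.update ps).contains k = true := by
  induction ps with
  | nil => intro d k h; exact h
  | cons p l ih =>
    intro d k h
    show ((d.insert p.1 p.2).update l).contains k = true
    exact ih _ _ (by rw [PySem.Dict.contains_insert, h, Bool.or_true])

lemma keys_ofList_ne_nil (p : Int × Int) (l : List (Int × Int)) :
    (PySem.Dict.ofList (p::l)).keys ≠ [] := by
  have h : (PySem.Dict.ofList (p::l)).contains p.1 = true := by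
    show ((PySem.Dict.empty.insert p.1 p.2).update l).contains p.1 = true
    exact contains_update_mono _ _ (PySem.Dict.contains_insert_self _ _ _)
  intro hnil
  rw [PySem.Dict.contains_iff_mem_keys, hnil] at h
  exact List.not_mem_nil h

lemma pvFinishA_eq_B (emd : Int) : ∀ s : List Int, s.Pairwise (· < ·) → s ≠ [] →
    pvFinishA emd s = pvFinishB emd s := by
  intro s
  induction s with
  | nil => intro _ h; exact absurd rfl h
  | cons a t ih =>
    intro hp _
    cases t with
    | nil =>
      simp only [pvFinishA, pvFinishB, pvScanA, List.foldl, List.head?, List.getLast?]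
      split_ifs <;> simp_all <;> omega
    | cons b u =>
      obtain ⟨ha, hp'⟩ := List.pairwise_cons.mp hp
      obtain ⟨hb, hp''⟩ := List.pairwise_cons.mp hp'
      have hab : a < b := ha b (by simp)
      by_cases h1 : a ≤ emd ∧ emd ≤ b
      · -- bracket found at the first pair
        have hk0 : (b::u).countP (fun x => decide (x < emd)) = 0 := by
          apply List.countP_eq_zero.mpr
          intro x hx
          rcases List.mem_cons.mp hx with rfl | hxu
          · simpa using not_lt.mpr h1.2
          · have := hb x hxu; simp; omega
        have hL : pvFinishA emd (a::b::u) = (some a, some b) := by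
          simp [pvFinishA, pvScanA, if_pos h1]
        rw [hL]
        simp only [pvFinishB, rank_eq, List.countP_cons, hk0]
        by_cases hae : a < emd
        · simp [hae]
          intro h; exact absurd h (by omega)
        · have hae' : a = emd := by omega
          simp [hae']
          intro h; exact absurd h (by omega)
      · -- no bracket at the first pair
        by_cases h2 : emd < a
        · -- emd below every key
          have hall : ∀ x ∈ a::b::u, emd < x := by
            intro x hx
            rcases List.mem_cons.mp hx with rfl | hx
            · exact h2
            · exact lt_trans h2 (ha x hx)
          have hk0 : (a::b::u).countP (fun x => decide (x < emd)) = 0 := by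
            apply List.countP_eq_zero.mpr
            intro x hx; have := hall x hx; simp; omega
          have hsc := pvScanA_none emd _ hall
          simp only [pvFinishA, hsc, pvFinishB, rank_eq, hk0]
          cases hgl : (a::b::u).getLast? with
          | none => simp at hgl
          | some L =>
            have hLmem : L ∈ a::b::u := List.mem_of_getLast? hgl
            have hemdL : emd < L := hall L hLmem
            simp [h2, ne_of_lt h2]
            omega
        · -- a ≤ emd and b < emd: drop the head and recurse
          have hble : b < emd := by
            by_cases h3 : a ≤ emd
            · by_contra hc; exact h1 ⟨h3, by omega⟩
            · omega
          have halt : a < emd := by omega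
          have hA : pvFinishA emd (a::b::u) = pvFinishA emd (b::u) := by
            simp only [pvFinishA, pvScanA, if_neg h1]
            cases hsc : pvScanA emd (b::u) with
            | some p => simp
            | none =>
              cases hgl : (b::u).getLast? with
              | none => simp at hgl
              | some L =>
                simp [List.getLast?_cons_cons, hgl, not_lt.mpr (le_of_lt halt),
                  not_lt.mpr (le_of_lt hble)]
          have hkpos : 0 < (b::u).countP (fun x => decide (x < emd)) :=
            List.countP_pos_iff.mpr ⟨b, by simp, by simpa using hble⟩
          have hcc : (a::b::u).countP (fun x => decide (x < emd))
              = (b::u).countP (fun x => decide (x < emd)) + 1 := by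
            rw [List.countP_cons]; simp [halt]
          have hB : pvFinishB emd (a::b::u) = pvFinishB emd (b::u) := by
            simp only [pvFinishB, rank_eq, hcc, List.getLast?_cons_cons, List.length_cons]
            generalize hgk : (b::u).countP (fun x => decide (x < emd)) = k at hkpos ⊢
            obtain ⟨k', rfl⟩ : ∃ k', k = k' + 1 := ⟨k - 1, by omega⟩
            split_ifs with c1 c2 c3 c4 c5 c6
            all_goals try rfl
            all_goals try (exfalso; omega)
            have e1 : ((↑(k'+1+1):Int)) - 1 = ((k'+1 : Nat) : Int) := by push_cast; ring
            have e2 : ((↑(k'+1+1):Int)) = ((k'+2 : Nat) : Int) := by push_cast; ring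
            have e3 : ((↑(k'+1):Int)) - 1 = ((k' : Nat) : Int) := by push_cast; ring
            rw [e1, e2, e3, PySem.List.pyGet?_natCast, PySem.List.pyGet?_natCast,
              PySem.List.pyGet?_natCast, PySem.List.pyGet?_natCast]
            simp
          rw [hA, hB]
          exact ih hp' (by simp)

-- ===== VERDICT (by name: the statement is the Claim_ definition above) =====
theorem find_nearest_milestones_spec : Claim_equal_find_nearest_milestones := by
  intro emd milestones _ hpre
  unfold Spec_find_nearest_milestones find_nearest_milestones find_nearest_milestones_alt
  apply pvFinishA_eq_B
  · have hle := PySem.List.sorted_pairwise (PySem.Dict.ofList milestones).keys (fun x => x)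
    have hnd : (PySem.List.sorted (PySem.Dict.ofList milestones).keys (fun x => x)).Nodup :=
      (PySem.List.sorted_perm (PySem.Dict.ofList milestones).keys (fun x => x) false).nodup_iff.mpr
        (PySem.Dict.nodup_keys_ofList milestones)
    exact (hle.and hnd).imp (fun h => lt_of_le_of_ne h.1 h.2)
  · cases hm : milestones with
    | nil => exact absurd hm hpre
    | cons p l =>
      intro hnil
      rw [PySem.List.sorted_eq_nil_iff] at hnil
      exact keys_ofList_ne_nil p l hnil
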